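-- pv_equiv track=rewrite | github.com/cyxfff/icache_test | modules/block_loop.py | count_indirect_blocks
-- ===== SOURCE A (Python) =====
-- def count_indirect_blocks(total_blocks: int, direct_run_len: int) -> int:
--     if total_blocks <= 1:
--         return 0
--     return sum(
--         1
--         for logical_id in range(total_blocks - 1)
--         if direct_run_len <= 1 or ((logical_id + 1) % direct_run_len == 0)
--     )
-- ===== SOURCE B (Python) =====
-- def count_indirect_blocks(total_blocks: int, direct_run_len: int) -> int:
--     if total_blocks <= 1:
--         return 0
--     if direct_run_len <= 1:
--         return total_blocks - 1
--     return (total_blocks - 1) // direct_run_len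
-- ===== Notes on version B (the rewrite author's own statement) =====
-- stated objective: faster
-- what changed: Replaces the O(n) generator scan over range(total_blocks-1) with a closed-form floor division (total_blocks-1)//direct_run_len (or total_blocks-1 when direct_run_len<=1).
import Mathlib
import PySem

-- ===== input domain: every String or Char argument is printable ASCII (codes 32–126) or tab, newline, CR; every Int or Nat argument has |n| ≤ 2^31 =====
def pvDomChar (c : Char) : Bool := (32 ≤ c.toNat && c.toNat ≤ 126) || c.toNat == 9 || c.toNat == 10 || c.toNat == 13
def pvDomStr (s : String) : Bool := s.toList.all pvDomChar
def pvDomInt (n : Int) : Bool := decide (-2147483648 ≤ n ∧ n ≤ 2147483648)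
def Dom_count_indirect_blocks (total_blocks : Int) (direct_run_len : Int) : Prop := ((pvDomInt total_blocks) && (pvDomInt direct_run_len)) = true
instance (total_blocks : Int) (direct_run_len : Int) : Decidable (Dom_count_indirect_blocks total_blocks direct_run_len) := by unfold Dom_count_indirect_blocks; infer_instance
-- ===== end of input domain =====

-- ===== PORT A =====
-- literal port: sum of 1 over range(total_blocks-1) filtered by the or-condition
def count_indirect_blocks (total_blocks : Int) (direct_run_len : Int) : Int :=
  if total_blocks ≤ 1 then 0
  else
    ((((PySem.List.pyRange 0 (total_blocks - 1) 1).filter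
        (fun logical_id => decide (direct_run_len ≤ 1) || decide (PySem.Int.mod (logical_id + 1) direct_run_len = 0))).map
        (fun _ => (1 : Int))).sum)

-- ===== PORT B =====
-- B: closed form, no loop (why: O(1) instead of O(total_blocks))
def count_indirect_blocks_alt (total_blocks : Int) (direct_run_len : Int) : Int :=
  if total_blocks ≤ 1 then 0
  else if direct_run_len ≤ 1 then total_blocks - 1
  else PySem.Int.floordiv (total_blocks - 1) direct_run_len

-- ===== PRECONDITION & SPEC =====
def Spec_count_indirect_blocks (total_blocks : Int) (direct_run_len : Int) (out : Int) : Prop := out = count_indirect_blocks_alt total_blocks direct_run_len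
instance (total_blocks : Int) (direct_run_len : Int) (out : Int) : Decidable (Spec_count_indirect_blocks total_blocks direct_run_len out) := by unfold Spec_count_indirect_blocks; infer_instance

-- ===== CLAIM (what is proved, stated in full; the proofs are below) =====
def Claim_equal_count_indirect_blocks : Prop := ∀ (total_blocks : Int) (direct_run_len : Int), Dom_count_indirect_blocks total_blocks direct_run_len → Spec_count_indirect_blocks total_blocks direct_run_len (count_indirect_blocks total_blocks direct_run_len)

-- ===== LEMMAS AND PROOFS =====

-- ===== VERDICT (by name: the statement is the Claim_ definition above) =====

-- count of i ∈ [0,n) with d ∣ (i+1) equals n / d, for d ≥ 2, by induction on n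
theorem cnt_lemma (d : Int) (hd : 2 ≤ d) (n : Nat) :
    ((((PySem.List.pyRange 0 (n : Int) 1).filter
        (fun i => decide (d ≤ 1) || decide (PySem.Int.mod (i + 1) d = 0))).map
        (fun _ => (1 : Int))).sum)
      = ((n / d.toNat : Nat) : Int) := by
  induction n with
  | zero => simp
  | succ n ih =>
    have hsplit : PySem.List.pyRange 0 ((n + 1 : Nat) : Int) 1
        = PySem.List.pyRange 0 (n : Int) 1 ++ [(n : Int)] := by
      have := PySem.List.pyRange_one_succ_right (a := 0) (b := (n : Int)) (by positivity)
      push_cast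
      simpa using this
    rw [hsplit]
    rw [List.filter_append, List.map_append, List.sum_append, ih]
    have hdle : ¬ (d ≤ 1) := by omega
    have hmod : PySem.Int.mod ((n : Int) + 1) d = 0 ↔ d ∣ ((n : Int) + 1) :=
      PySem.Int.mod_eq_zero_iff_dvd _ _
    have hdvd_iff : d ∣ ((n : Int) + 1) ↔ d.toNat ∣ (n + 1) := by
      rw [show ((n : Int) + 1) = ((n + 1 : Nat) : Int) by push_cast; ring]
      rw [show d = (d.toNat : Int) by omega]
      exact Int.natCast_dvd_natCast
    rw [Nat.succ_div]
    by_cases h : d.toNat ∣ (n + 1)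
    · have : PySem.Int.mod ((n : Int) + 1) d = 0 := hmod.mpr (hdvd_iff.mpr h)
      simp [List.filter, hdle, this, h]
    · have : ¬ PySem.Int.mod ((n : Int) + 1) d = 0 := fun hc => h (hdvd_iff.mp (hmod.mp hc))
      simp [List.filter, hdle, this, h]

theorem count_indirect_blocks_spec : Claim_equal_count_indirect_blocks := by
  intro tb d _
  unfold Spec_count_indirect_blocks count_indirect_blocks count_indirect_blocks_alt
  by_cases h1 : tb ≤ 1
  · simp [h1]
  · rw [if_neg h1, if_neg h1]
    by_cases h2 : d ≤ 1
    · rw [if_pos h2]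
      have hfilter : (PySem.List.pyRange 0 (tb - 1) 1).filter
          (fun logical_id => decide (d ≤ 1) || decide (PySem.Int.mod (logical_id + 1) d = 0))
          = PySem.List.pyRange 0 (tb - 1) 1 := by
        apply List.filter_eq_self.mpr
        intro a _
        simp [h2]
      rw [hfilter, PySem.List.sum_map_const_int, PySem.List.length_pyRange_one]
      omega
    · rw [if_neg h2]
      have hn : tb - 1 = (((tb - 1).toNat : Nat) : Int) := by omega
      rw [hn, cnt_lemma d (by omega)]
      rw [show d = ((d.toNat : Nat) : Int) by omega]
      rw [PySem.Int.floordiv_natCast]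
      simp
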